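-- pv_equiv track=rewrite | github.com/Lenic/leetcode-python | menu/816.py | ambiguousCoordinates
-- ===== SOURCE A (Python) =====
-- from typing import List
--
-- def ambiguousCoordinates(s: str) -> List[str]:
--     data = s[1:-1]
--     res: List[str] = []
--
--     def getValue(data: str):
--         """获得数字的各种情况"""
--         res: List[str] = []
--         # 只有一位时只有一种情况
--         if len(data) == 1:
--             res.append(data)
--         # 第一个字符为 0 时需要特殊处理
--         elif data[0] == "0":
--             # 第一个字符为 0 最后一个字符不是 0 说明必须是小数才成立，并且小数点在第一位的后面
--             if data[-1] != "0":
--                 res.append(f"{data[0]}.{data[1:]}")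
--             # 首尾都是 0 说明数字异常不可用，不加入结果
--         else:
--             # 从左侧分到一个数字开始，到右侧分到一个数字结束
--             for i in range(1, len(data)):
--                 left = data[:i]
--                 right = data[i:]
--                 # 右侧最后一个数字是 0 表示必须是整数才能成立，也就是不带小数点的情况
--                 if right[-1] != "0":
--                     res.append(f"{left}.{right}")
--             # 还有一种情况就是全部分到左侧或者右侧，也就是不带小数点的情况
--             res.append(data)
--         return res
--
--     for i in range(1, len(data)):
--         leftList = getValue(data[:i])
--         rightList = getValue(data[i:])
--
--         for l in leftList:
--             for r in rightList:
--                 res.append(f"({l}, {r})")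
--
--     return res
-- ===== SOURCE B (Python) =====
-- from typing import List
--
-- def ambiguousCoordinates(s: str) -> List[str]:
--     d = s[1:-1]
--     n = len(d)
--     # Backward DP pass: rall[i] = every dotted form of the suffix d[i:]
--     # (dot at each interior position), leading/trailing-zero rules NOT yet applied.
--     rall: List[List[str]] = [[] for _ in range(n)]
--     for i in range(n - 2, -1, -1):
--         rall[i] = [d[i] + '.' + d[i + 1:]] + [d[i] + t for t in rall[i + 1]]
--     tail_ok = n > 0 and d[-1] != '0'
--     res: List[str] = []
--     dl: List[str] = []  # every dotted form of the current prefix d[:i], unfiltered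
--     for i in range(1, n):
--         c = d[i - 1]
--         if i > 1:
--             dl = [x + c for x in dl] + [d[:i - 1] + '.' + c]
--         lefts = ((dl if d[0] != '0' else dl[:1]) if c != '0' else []) \
--                 + ([d[:i]] if d[0] != '0' or i == 1 else [])
--         rights = ((rall[i] if d[i] != '0' else rall[i][:1]) if tail_ok else []) \
--                  + ([d[i:]] if d[i] != '0' or i == n - 1 else [])
--         for l in lefts:
--             for r in rights:
--                 res.append(f"({l}, {r})")
--     return res
-- ===== Notes on version B (the rewrite author's own statement) =====
-- stated objective: alternative
-- what changed: A calls a per-half helper getValue that re-slices each half at every interior position with three special-case branches; B instead builds one backward DP table of all dotted suffix forms (each row derived from the next by prepending one character) and maintains the prefix's dotted forms incrementally in a forward accumulator (each step appends one character and adds one new form), applying the leading/trailing-zero rules as uniform head/last-character filters at use time.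
import Mathlib
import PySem

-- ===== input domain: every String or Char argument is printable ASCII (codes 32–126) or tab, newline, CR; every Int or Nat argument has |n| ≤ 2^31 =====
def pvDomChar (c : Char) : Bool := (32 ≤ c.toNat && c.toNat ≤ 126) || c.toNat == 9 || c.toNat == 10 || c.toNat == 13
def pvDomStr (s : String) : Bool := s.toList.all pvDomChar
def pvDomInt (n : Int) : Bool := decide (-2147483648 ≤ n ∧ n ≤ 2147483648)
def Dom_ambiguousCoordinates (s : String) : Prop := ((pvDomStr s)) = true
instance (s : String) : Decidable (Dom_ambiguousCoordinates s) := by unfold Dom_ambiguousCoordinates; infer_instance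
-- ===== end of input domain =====

-- B replaces A's per-half slicing helper getValue by a backward DP over suffixes (each row of
-- dotted forms built from the next by prepending one character) plus an incrementally maintained
-- accumulator of the prefix's dotted forms, filtering zero rules at use time (objective: alternative).

-- ===== PORT A =====
-- port of A's inner helper getValue (Python only ever applies it to nonempty substrings)
def pvGetValueA (data : String) : List String :=
  if PySem.Str.len data = 1 then
    [data]
  else
    match PySem.Str.pyGet? data 0 with
    | none => []
    | some c0 =>
      if c0 = '0' then
        if PySem.Str.pyGet? data (-1) ≠ some '0' then
          [String.ofList [c0] ++ "." ++ PySem.Str.slice data (some 1) none]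
        else []
      else
        ((PySem.List.pyRange 1 (PySem.Str.len data)).foldl (fun acc i =>
          let left := PySem.Str.slice data none (some i)
          let right := PySem.Str.slice data (some i) none
          if PySem.Str.pyGet? right (-1) ≠ some '0' then acc ++ [left ++ "." ++ right] else acc) [])
        ++ [data]

def ambiguousCoordinates (s : String) : List String :=
  let data := PySem.Str.slice s (some 1) (some (-1))
  (PySem.List.pyRange 1 (PySem.Str.len data)).foldl (fun res i =>
    let leftList := pvGetValueA (PySem.Str.slice data none (some i))
    let rightList := pvGetValueA (PySem.Str.slice data (some i) none)
    leftList.foldl (fun res l =>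
      rightList.foldl (fun res r => res ++ ["(" ++ l ++ ", " ++ r ++ ")"]) res) res) []

-- ===== PORT B =====
-- port of Source B's backward table loop 'rall[i] = [d[i]+"."+d[i+1:]] + [d[i]+t for t in rall[i+1]]'
-- as the structural recursion on the suffix it computes (row i from row i+1)
def pvRallSuffix : List Char → List String
  | [] => []
  | [_] => []
  | c :: c2 :: rest =>
    (String.ofList [c] ++ "." ++ String.ofList (c2 :: rest)) ::
      (pvRallSuffix (c2 :: rest)).map (fun t => String.ofList [c] ++ t)

-- 1-char Python indexings d[0], d[i-1], d[i], d[-1] (always in range where evaluated) are ported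
-- as the equal 1-character slices d[0:1], d[i-1:i], d[i:i+1], d[-1:]; dl[:1] / rall[i][:1] as .take 1
def ambiguousCoordinates_alt (s : String) : List String :=
  let d := PySem.Str.slice s (some 1) (some (-1))
  let n := PySem.Str.len d
  let tailOk := decide (0 < n ∧ PySem.Str.slice d (some (-1)) none ≠ "0")
  ((PySem.List.pyRange 1 n).foldl (fun (st : List String × List String) i =>
    let c := PySem.Str.slice d (some (i-1)) (some i)
    let d0 := PySem.Str.slice d none (some 1)
    let dl := if 1 < i then
        st.1.map (fun x => x ++ c) ++ [PySem.Str.slice d none (some (i-1)) ++ "." ++ c]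
      else st.1
    let lefts :=
      (if c ≠ "0" then (if d0 ≠ "0" then dl else dl.take 1) else [])
      ++ (if d0 ≠ "0" ∨ i = 1 then [PySem.Str.slice d none (some i)] else [])
    let di := PySem.Str.slice d (some i) (some (i+1))
    let ri := pvRallSuffix (PySem.Str.slice d (some i) none).toList
    let rights :=
      (if tailOk then (if di ≠ "0" then ri else ri.take 1) else [])
      ++ (if di ≠ "0" ∨ i = n - 1 then [PySem.Str.slice d (some i) none] else [])
    (dl, lefts.foldl (fun res l =>
      rights.foldl (fun res r => res ++ ["(" ++ l ++ ", " ++ r ++ ")"]) res) st.2)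
  ) ([], [])).2

-- ===== PRECONDITION & SPEC =====
def Spec_ambiguousCoordinates (s : String) (out : List String) : Prop := out = ambiguousCoordinates_alt s
instance (s : String) (out : List String) : Decidable (Spec_ambiguousCoordinates s out) := by unfold Spec_ambiguousCoordinates; infer_instance

-- ===== CLAIM (what is proved, stated in full; the proofs are below) =====
def Claim_equal_ambiguousCoordinates : Prop := ∀ (s : String), Dom_ambiguousCoordinates s → Spec_ambiguousCoordinates s (ambiguousCoordinates s)

-- ===== LEMMAS AND PROOFS =====

-- A-side characterisation: each half's candidate list as one guarded scan over split positions
def pvPartsB (d : String) : List String :=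
  (PySem.List.pyRange 1 (PySem.Str.len d + 1)).filterMap (fun i =>
    if (PySem.Str.slice d none (some i) = "0" ∨ PySem.Str.pyGet? d 0 ≠ some '0')
        ∧ (i = PySem.Str.len d ∨ PySem.Str.pyGet? d (-1) ≠ some '0') then
      some (PySem.Str.slice d none (some i) ++
            (if i < PySem.Str.len d then "." ++ PySem.Str.slice d (some i) none else ""))
    else none)

def pvCross (d : String) (i : Int) : List String :=
  (pvPartsB (PySem.Str.slice d none (some i))).flatMap (fun l =>
    (pvPartsB (PySem.Str.slice d (some i) none)).map (fun r => "(" ++ l ++ ", " ++ r ++ ")"))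

-- common middle form both ports are reduced to
def pvMid (s : String) : List String :=
  let d := PySem.Str.slice s (some 1) (some (-1))
  (PySem.List.pyRange 1 (PySem.Str.len d)).flatMap (pvCross d)

theorem sliceTake (d : String) (i : Int) (h : 0 ≤ i) :
    (PySem.Str.slice d none (some i)).toList = d.toList.take i.toNat := by
  simp [PySem.Str.toList_slice, PySem.List.slice_to _ h]

theorem sliceDrop (d : String) (i : Int) (h : 0 ≤ i) :
    (PySem.Str.slice d (some i) none).toList = d.toList.drop i.toNat := by
  simp [PySem.Str.toList_slice, PySem.List.slice_from _ h]

theorem getLastStr (d : String) : PySem.Str.pyGet? d (-1) = d.toList.getLast? := by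
  simp [PySem.List.pyGet?_neg_one]

theorem getValue_eq_parts (d : String) (h : d.toList ≠ []) : pvGetValueA d = pvPartsB d := by
  obtain ⟨c, t, hl⟩ : ∃ c t, d.toList = c :: t := by
    cases hd : d.toList with
    | nil => exact absurd hd h
    | cons c t => exact ⟨c, t, rfl⟩
  have hget0 : PySem.Str.pyGet? d 0 = some c := by simp [pysem, hl]
  have hlen : PySem.Str.len d = (t.length + 1 : Int) := by simp [PySem.Str.len_eq, hl]
  unfold pvGetValueA pvPartsB
  cases t with
  | nil =>
    -- length-1 case
    have h1 : PySem.Str.len d = 1 := by rw [hlen]; norm_num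
    rw [if_pos h1, h1]
    rw [show (1 + 1 : Int) = 2 by norm_num,
        show PySem.List.pyRange 1 2 = [1] from PySem.List.pyRange_one_singleton 1]
    have hval : PySem.Str.slice d none (some 1) ++
        (if (1:Int) < 1 then "." ++ PySem.Str.slice d (some 1) none else "") = d := by
      rw [if_neg (by omega)]
      rw [String.append_empty]
      apply String.toList_inj.mp
      rw [sliceTake d 1 (by omega), hl]; rfl
    by_cases hc : c = '0'
    · have : PySem.Str.slice d none (some 1) = "0" := by
        apply String.toList_inj.mp
        rw [sliceTake d 1 (by omega), hl, hc]; rfl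
      simp only [List.filterMap_cons, List.filterMap_nil]
      rw [if_pos ⟨Or.inl this, by simp⟩, hval]
    · simp only [List.filterMap_cons, List.filterMap_nil]
      rw [if_pos ⟨Or.inr (by rw [hget0]; simp [hc]), by simp⟩, hval]
  | cons c2 t2 =>
    have hn : (2:Int) ≤ PySem.Str.len d := by rw [hlen]; simp; omega
    rw [if_neg (by omega), hget0]
    dsimp only
    have hlast : PySem.Str.pyGet? d (-1) = d.toList.getLast? := getLastStr d
    by_cases hc : c = '0'
    · -- leading zero, length ≥ 2
      subst hc
      rw [if_pos rfl]
      rw [PySem.List.pyRange_one_cons (by omega : (1:Int) < PySem.Str.len d + 1)]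
      rw [List.filterMap_cons]
      have htail : (PySem.List.pyRange (1 + 1) (PySem.Str.len d + 1)).filterMap (fun i =>
          if (PySem.Str.slice d none (some i) = "0" ∨ (some '0' : Option Char) ≠ some '0')
              ∧ (i = PySem.Str.len d ∨ PySem.Str.pyGet? d (-1) ≠ some '0') then
            some (PySem.Str.slice d none (some i) ++
                  (if i < PySem.Str.len d then "." ++ PySem.Str.slice d (some i) none else ""))
          else none) = [] := by
        rw [List.filterMap_eq_nil_iff]
        intro i hi
        rw [PySem.List.mem_pyRange_one] at hi
        rw [if_neg]
        rintro ⟨h1 | h1, -⟩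
        · have := congrArg (fun s => s.toList.length) h1
          simp only [sliceTake d i (by omega)] at this
          rw [hl] at this
          simp at this
          omega
        · exact h1 rfl
      have hfirst : PySem.Str.slice d none (some 1) = "0" := by
        apply String.toList_inj.mp
        rw [sliceTake d 1 (by omega), hl]; rfl
      by_cases hz : d.toList.getLast? = some '0'
      · rw [if_neg (fun h2 => h2 (hlast.trans hz))]
        rw [if_neg (fun hcon => hcon.2.elim (fun he => absurd he (by omega)) (fun hne => hne (hlast.trans hz)))]
        dsimp only
        rw [htail]
      · rw [if_pos (by rw [hlast]; exact hz)]
        rw [if_pos ⟨Or.inl hfirst, Or.inr (by rw [hlast]; exact hz)⟩]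
        dsimp only
        rw [htail]
        rw [if_pos (by omega : (1:Int) < PySem.Str.len d)]
        congr 1
        rw [hfirst]
        apply String.toList_inj.mp
        simp only [String.toList_append]
        rfl
    · -- no leading zero, length ≥ 2
      rw [if_neg hc]
      rw [PySem.List.foldl_append_ite
        (fun i => PySem.Str.pyGet? (PySem.Str.slice d (some i) none) (-1) ≠ some '0')
        (fun i => PySem.Str.slice d none (some i) ++ "." ++ PySem.Str.slice d (some i) none)]
      rw [List.nil_append]
      have hfc : ∀ i ∈ PySem.List.pyRange 1 (PySem.Str.len d),
          (decide (PySem.Str.pyGet? (PySem.Str.slice d (some i) none) (-1) ≠ some '0'))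
          = (decide (d.toList.getLast? ≠ some '0')) := by
        intro i hi
        rw [PySem.List.mem_pyRange_one] at hi
        have hi' : 1 ≤ i ∧ i < (t2.length : Int) + 2 := by
          rw [hlen] at hi; simp at hi; omega
        have : PySem.Str.pyGet? (PySem.Str.slice d (some i) none) (-1) = d.toList.getLast? := by
          rw [getLastStr, sliceDrop d i (by omega), List.getLast?_drop,
            if_neg (by rw [hl]; simp; omega)]
        rw [this]
      rw [List.filter_congr hfc]
      rw [PySem.List.pyRange_one_succ_right (by omega : (1:Int) ≤ PySem.Str.len d)]
      rw [List.filterMap_append]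
      have hnval : PySem.Str.slice d none (some (PySem.Str.len d)) ++
          (if PySem.Str.len d < PySem.Str.len d then "." ++ PySem.Str.slice d (some (PySem.Str.len d)) none else "") = d := by
        rw [if_neg (by omega), String.append_empty]
        apply String.toList_inj.mp
        rw [sliceTake d _ (by omega), PySem.Str.len_eq]
        simp
      have hlastpiece : List.filterMap (fun i =>
          if (PySem.Str.slice d none (some i) = "0" ∨ (some c : Option Char) ≠ some '0')
              ∧ (i = PySem.Str.len d ∨ PySem.Str.pyGet? d (-1) ≠ some '0') then
            some (PySem.Str.slice d none (some i) ++
                  (if i < PySem.Str.len d then "." ++ PySem.Str.slice d (some i) none else ""))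
          else none) [PySem.Str.len d] = [d] := by
        rw [List.filterMap_cons, List.filterMap_nil]
        rw [if_pos ⟨Or.inr (by simp [hc]), Or.inl rfl⟩]
        dsimp only
        rw [hnval]
      rw [hlastpiece]
      by_cases hz : d.toList.getLast? = some '0'
      · rw [show (decide (d.toList.getLast? ≠ some '0')) = false by simp [hz]]
        rw [List.filter_false, List.map_nil, List.nil_append]
        have : List.filterMap (fun i =>
            if (PySem.Str.slice d none (some i) = "0" ∨ (some c : Option Char) ≠ some '0')
                ∧ (i = PySem.Str.len d ∨ PySem.Str.pyGet? d (-1) ≠ some '0') then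
              some (PySem.Str.slice d none (some i) ++
                    (if i < PySem.Str.len d then "." ++ PySem.Str.slice d (some i) none else ""))
            else none) (PySem.List.pyRange 1 (PySem.Str.len d)) = [] := by
          rw [List.filterMap_eq_nil_iff]
          intro i hi
          rw [PySem.List.mem_pyRange_one] at hi
          rw [if_neg (fun hcon => hcon.2.elim (fun he => absurd he (by omega)) (fun hne => hne (hlast.trans hz)))]
        rw [this]
        rw [List.nil_append]
      · rw [show (decide (d.toList.getLast? ≠ some '0')) = true by simp [hz]]
        rw [List.filter_true]
        congr 1
        rw [List.filterMap_congr (g := fun i =>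
            some (PySem.Str.slice d none (some i) ++ "." ++ PySem.Str.slice d (some i) none)) ?_]
        · exact (List.filterMap_eq_map_iff_forall_eq_some.mpr (fun x _ => rfl)).symm
        · intro i hi
          rw [PySem.List.mem_pyRange_one] at hi
          rw [if_pos ⟨Or.inr (by simp [hc]), Or.inr (by rw [hlast]; exact hz)⟩]
          rw [if_pos (by omega : i < PySem.Str.len d)]
          dsimp only
          rw [String.append_assoc]

theorem A_eq_mid (s : String) : ambiguousCoordinates s = pvMid s := by
  unfold ambiguousCoordinates pvMid pvCross
  dsimp only
  set d := PySem.Str.slice s (some 1) (some (-1)) with hd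
  simp only [PySem.List.foldl_append_singleton_eq_map, PySem.List.foldl_append_eq_flatMap]
  rw [List.nil_append]
  apply List.flatMap_congr
  intro i hi
  rw [PySem.List.mem_pyRange_one] at hi
  have hlen : PySem.Str.len d = (d.toList.length : Int) := PySem.Str.len_eq d
  rw [hlen] at hi
  rw [getValue_eq_parts _ (by
        rw [sliceDrop d i (by omega)]
        intro hnil
        have := congrArg List.length hnil
        simp only [List.length_drop, List.length_nil] at this
        omega),
      getValue_eq_parts _ (by
        rw [sliceTake d i (by omega)]
        intro hnil
        have := congrArg List.length hnil
        simp only [List.length_take, List.length_nil] at this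
        omega)]

-- B-side: the dotted forms of a digit block, one per interior position, zero rules not applied
def pvDotAll (x : List Char) : List String :=
  (List.range' 1 (x.length - 1)).map (fun j =>
    String.ofList (x.take j) ++ "." ++ String.ofList (x.drop j))

theorem ofListSliceTake (d : String) (i : Int) (h : 0 ≤ i) :
    PySem.Str.slice d none (some i) = String.ofList (d.toList.take i.toNat) := by
  apply String.toList_inj.mp
  simp [sliceTake d i h]

theorem ofListSliceDrop (d : String) (i : Int) (h : 0 ≤ i) :
    PySem.Str.slice d (some i) none = String.ofList (d.toList.drop i.toNat) := by
  apply String.toList_inj.mp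
  simp [sliceDrop d i h]

theorem ofList_eq_zero_iff (l : List Char) : String.ofList l = "0" ↔ l = ['0'] := by
  rw [← String.toList_inj]; simp

theorem rall_eq_dotAll (x : List Char) : pvRallSuffix x = pvDotAll x := by
  induction x with
  | nil => rfl
  | cons c rest ih =>
    cases rest with
    | nil => rfl
    | cons c2 t =>
      rw [pvRallSuffix, ih]
      unfold pvDotAll
      simp only [List.length_cons, Nat.add_sub_cancel]
      rw [List.range'_succ]
      simp only [List.map_cons, List.map_map]
      congr 1
      rw [List.range'_eq_map_range, List.range'_eq_map_range]
      simp only [List.map_map]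
      apply List.map_congr_left
      intro k hk
      simp only [Function.comp_apply]
      rw [← String.toList_inj]
      simp [List.take_cons, List.drop_cons]

theorem dotAll_snoc (xs : List Char) (c : Char) (h : xs ≠ []) :
    pvDotAll (xs ++ [c]) =
      (pvDotAll xs).map (fun t => t ++ String.ofList [c]) ++
        [String.ofList xs ++ "." ++ String.ofList [c]] := by
  have hL : 1 ≤ xs.length := List.length_pos_iff.mpr h
  unfold pvDotAll
  simp only [List.length_append, List.length_cons, List.length_nil]
  rw [show xs.length + (0 + 1) - 1 = (xs.length - 1) + 1 by omega]
  rw [show List.range' 1 ((xs.length - 1) + 1) = List.range' 1 (xs.length - 1) ++ [1 + (xs.length - 1)]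
      by simpa using List.range'_concat (s := 1) (n := xs.length - 1) (step := 1)]
  rw [List.map_append, List.map_map]
  congr 1
  · apply List.map_congr_left
    intro j hj
    rw [List.mem_range'_1] at hj
    simp only [Function.comp_apply]
    rw [← String.toList_inj]
    have h1 : (xs ++ [c]).take j = xs.take j := List.take_append_of_le_length (by omega)
    have h2 : (xs ++ [c]).drop j = xs.drop j ++ [c] := List.drop_append_of_le_length (by omega)
    simp [h1, h2]
  · rw [show 1 + (xs.length - 1) = xs.length by omega]
    simp only [List.map_cons, List.map_nil, List.cons.injEq, and_true]
    rw [← String.toList_inj]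
    simp

set_option maxHeartbeats 2000000 in
theorem parts_split (x : List Char) (hx : x ≠ []) :
    pvPartsB (String.ofList x) =
      (if x.getLast? ≠ some '0' then
        (if x.head? ≠ some '0' then pvDotAll x else (pvDotAll x).take 1) else [])
      ++ (if x.head? ≠ some '0' ∨ x.length = 1 then [String.ofList x] else []) := by
  obtain ⟨c, t, rfl⟩ : ∃ c t, x = c :: t := by
    cases x with
    | nil => exact absurd rfl hx
    | cons c t => exact ⟨c, t, rfl⟩
  set d := String.ofList (c :: t) with hd
  have hT : d.toList = c :: t := by simp [hd]
  have hget0 : PySem.Str.pyGet? d 0 = some c := by simp [pysem, hT]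
  have hlast : PySem.Str.pyGet? d (-1) = (c :: t).getLast? := by rw [getLastStr, hT]
  have hlen : PySem.Str.len d = (t.length + 1 : Int) := by simp [PySem.Str.len_eq, hT]
  have hlen1 : (1 : Int) ≤ PySem.Str.len d := by omega
  have hsl : ∀ j : Int, 0 ≤ j → PySem.Str.slice d none (some j) = String.ofList ((c :: t).take j.toNat) := by
    intro j hj; rw [ofListSliceTake d j hj, hT]
  have hsr : ∀ j : Int, 0 ≤ j → PySem.Str.slice d (some j) none = String.ofList ((c :: t).drop j.toNat) := by
    intro j hj; rw [ofListSliceDrop d j hj, hT]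
  unfold pvPartsB
  rw [show PySem.Str.len d + 1 = PySem.Str.len d + 1 from rfl,
      PySem.List.pyRange_one_succ_right hlen1, List.filterMap_append]
  congr 1
  · -- interior split positions
    by_cases hz : (c :: t).getLast? = some '0'
    · rw [if_neg (by simpa using hz)]
      rw [List.filterMap_eq_nil_iff]
      intro j hj
      rw [PySem.List.mem_pyRange_one] at hj
      rw [if_neg]
      rintro ⟨-, hor⟩
      rcases hor with he | hne
      · omega
      · exact hne (hlast.trans hz)
    · rw [if_pos (by simpa using hz)]
      by_cases hc : c = '0'
      · rw [if_neg (by simp [hc])]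
        cases t with
        | nil =>
          simp only [List.length_nil] at hlen
          rw [show PySem.Str.len d = 1 from by omega, PySem.List.pyRange_one_eq_nil (by omega)]
          rfl
        | cons c2 t2 =>
          have hlen2 : (2 : Int) ≤ PySem.Str.len d := by rw [hlen]; simp; omega
          rw [PySem.List.pyRange_one_cons (by omega), List.filterMap_cons]
          rw [if_pos ⟨Or.inl (by rw [hsl 1 (by omega)]; simp [hc]),
                      Or.inr (by rw [hlast]; exact hz)⟩]
          have htail : List.filterMap (fun j =>
              if (PySem.Str.slice d none (some j) = "0" ∨ PySem.Str.pyGet? d 0 ≠ some '0')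
                  ∧ (j = PySem.Str.len d ∨ PySem.Str.pyGet? d (-1) ≠ some '0') then
                some (PySem.Str.slice d none (some j) ++
                      (if j < PySem.Str.len d then "." ++ PySem.Str.slice d (some j) none else ""))
              else none) (PySem.List.pyRange (1 + 1) (PySem.Str.len d)) = [] := by
            rw [List.filterMap_eq_nil_iff]
            intro j hj
            rw [PySem.List.mem_pyRange_one] at hj
            rw [if_neg]
            rintro ⟨h1 | h1, -⟩
            · rw [hsl j (by omega), ofList_eq_zero_iff] at h1
              have := congrArg List.length h1
              simp at this
              omega
            · rw [hget0] at h1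
              simp [hc] at h1
          dsimp only
          rw [htail]
          rw [if_pos (show (1:Int) < PySem.Str.len d by omega)]
          unfold pvDotAll
          rw [show (c :: c2 :: t2).length - 1 = t2.length + 1 by simp]
          rw [List.range'_succ]
          simp only [List.map_cons, List.take_succ_cons, List.take_zero,
            List.cons.injEq, and_true]
          rw [hsl 1 (by omega), hsr 1 (by omega)]
          rw [← String.toList_inj]
          simp
      · rw [if_pos (by simp [hc])]
        rw [List.filterMap_congr (g := fun j =>
            some (PySem.Str.slice d none (some j) ++ "." ++ PySem.Str.slice d (some j) none)) ?_]
        · rw [(List.filterMap_eq_map_iff_forall_eq_some.mpr (fun y _ => rfl))]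
          rw [PySem.List.pyRange_one]
          unfold pvDotAll
          rw [List.range'_eq_map_range]
          simp only [List.map_map]
          rw [show (PySem.Str.len d - 1).toNat = (c :: t).length - 1 by rw [hlen]; simp]
          apply List.map_congr_left
          intro k hk
          rw [List.mem_range] at hk
          have hk' : k < t.length := by simp only [List.length_cons] at hk; omega
          simp only [Function.comp_apply]
          rw [hsl (1 + k) (by omega), hsr (1 + k) (by omega)]
          rw [← String.toList_inj]
          simp [show ((1 : Int) + k).toNat = 1 + k by omega]
        · intro j hj
          rw [PySem.List.mem_pyRange_one] at hj
          rw [if_pos ⟨Or.inr (by rw [hget0]; simp [hc]), Or.inr (by rw [hlast]; exact hz)⟩,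
              if_pos (by omega)]
          dsimp only
          rw [← String.append_assoc]
  · -- the undotted (integer) candidate
    have hfull : PySem.Str.slice d none (some (PySem.Str.len d)) = d := by
      rw [hsl _ (by omega), show (PySem.Str.len d).toNat = t.length + 1 by omega]
      rw [List.take_of_length_le (by simp)]
    have hval : PySem.Str.slice d none (some (PySem.Str.len d)) ++
        (if PySem.Str.len d < PySem.Str.len d then "." ++ PySem.Str.slice d (some (PySem.Str.len d)) none else "") = d := by
      rw [if_neg (by omega), String.append_empty, hfull]
    by_cases hc : c = '0'
    · cases t with
      | nil =>
        rw [if_pos (show ([c].head? ≠ some '0' ∨ [c].length = 1) from Or.inr rfl)]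
        simp only [List.filterMap_cons, List.filterMap_nil]
        rw [if_pos (show (PySem.Str.slice d none (some (PySem.Str.len d)) = "0" ∨ PySem.Str.pyGet? d 0 ≠ some '0')
              ∧ (True ∨ PySem.Str.pyGet? d (-1) ≠ some '0') from
              ⟨Or.inl (by rw [hfull, hd, hc]), Or.inl trivial⟩), hval]
      | cons c2 t2 =>
        rw [if_neg (by simp [hc])]
        simp only [List.filterMap_cons, List.filterMap_nil]
        rw [if_neg]
        rintro ⟨hor, -⟩
        rcases hor with he | hne
        · rw [hfull] at he
          have := congrArg String.toList he
          rw [hT] at this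
          simp at this
        · rw [hget0] at hne
          simp [hc] at hne
    · rw [if_pos (Or.inl (by simp [hc]))]
      simp only [List.filterMap_cons, List.filterMap_nil]
      rw [if_pos (show (PySem.Str.slice d none (some (PySem.Str.len d)) = "0" ∨ PySem.Str.pyGet? d 0 ≠ some '0')
              ∧ (True ∨ PySem.Str.pyGet? d (-1) ≠ some '0') from
            ⟨Or.inr (by rw [hget0]; simp [hc]), Or.inl trivial⟩), hval]

-- the loop body of the B port, as a named function (definitionally the lambda in the port)
def pvStepB (d : String) : (List String × List String) → Int → (List String × List String) :=
  fun st i =>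
    let n := PySem.Str.len d
    let tailOk := decide (0 < n ∧ PySem.Str.slice d (some (-1)) none ≠ "0")
    let c := PySem.Str.slice d (some (i-1)) (some i)
    let d0 := PySem.Str.slice d none (some 1)
    let dl := if 1 < i then
        st.1.map (fun x => x ++ c) ++ [PySem.Str.slice d none (some (i-1)) ++ "." ++ c]
      else st.1
    let lefts :=
      (if c ≠ "0" then (if d0 ≠ "0" then dl else dl.take 1) else [])
      ++ (if d0 ≠ "0" ∨ i = 1 then [PySem.Str.slice d none (some i)] else [])
    let di := PySem.Str.slice d (some i) (some (i+1))
    let ri := pvRallSuffix (PySem.Str.slice d (some i) none).toList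
    let rights :=
      (if tailOk then (if di ≠ "0" then ri else ri.take 1) else [])
      ++ (if di ≠ "0" ∨ i = n - 1 then [PySem.Str.slice d (some i) none] else [])
    (dl, lefts.foldl (fun res l =>
      rights.foldl (fun res r => res ++ ["(" ++ l ++ ", " ++ r ++ ")"]) res) st.2)

theorem alt_eq_foldl (s : String) :
    ambiguousCoordinates_alt s =
      ((PySem.List.pyRange 1 (PySem.Str.len (PySem.Str.slice s (some 1) (some (-1))))).foldl
        (pvStepB (PySem.Str.slice s (some 1) (some (-1)))) ([], [])).2 := rfl

theorem sliceCharEq (d : String) (i : Int) (ch : Char) (h1 : 1 ≤ i)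
    (hch : d.toList[i.toNat - 1]? = some ch) :
    PySem.Str.slice d (some (i-1)) (some i) = String.ofList [ch] := by
  apply String.toList_inj.mp
  simp only [PySem.Str.toList_slice, PySem.Chars.slice_eq_listSlice]
  rw [PySem.List.slice_toNat _ (by omega) (by omega),
      show i.toNat - (i-1).toNat = 1 by omega,
      List.take_one, List.head?_drop,
      show (i-1).toNat = i.toNat - 1 by omega, hch]
  simp

theorem pvDotAll_short (l : List Char) (hl : l.length ≤ 1) : pvDotAll l = [] := by
  unfold pvDotAll
  rw [show l.length - 1 = 0 by omega]
  rfl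

theorem lefts_eq (d : String) (i : Int) (h1 : 1 ≤ i) (h2 : i < PySem.Str.len d) :
    (if PySem.Str.slice d (some (i-1)) (some i) ≠ "0" then
       (if PySem.Str.slice d none (some 1) ≠ "0" then pvDotAll (d.toList.take i.toNat)
        else (pvDotAll (d.toList.take i.toNat)).take 1) else [])
    ++ (if PySem.Str.slice d none (some 1) ≠ "0" ∨ i = 1 then [PySem.Str.slice d none (some i)] else [])
    = pvPartsB (PySem.Str.slice d none (some i)) := by
  have hlen : PySem.Str.len d = (d.toList.length : Int) := PySem.Str.len_eq d
  set L := d.toList with hLdef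
  set x := L.take i.toNat with hxdef
  have hxlen : x.length = i.toNat := by
    rw [hxdef, List.length_take]
    omega
  have hxne : x ≠ [] := by
    intro hnil
    have h0 := hxlen
    rw [hnil] at h0
    simp at h0
    omega
  obtain ⟨c0, rest, hLc⟩ : ∃ c0 rest, L = c0 :: rest := by
    cases hL' : L with
    | nil => exfalso; rw [hL'] at hlen; simp only [List.length_nil, Nat.cast_zero] at hlen; omega
    | cons a b => exact ⟨a, b, rfl⟩
  have hxh : x.head? = some c0 := by
    rw [hxdef, List.head?_take, if_neg (by omega), hLc]
    rfl
  obtain ⟨ch, hch⟩ : ∃ ch, L[i.toNat - 1]? = some ch :=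
    ⟨_, List.getElem?_eq_getElem (by omega)⟩
  have hxl : x.getLast? = some ch := by
    rw [hxdef, List.getLast?_take, if_neg (by omega), hch, Option.some_or]
  have hcs : PySem.Str.slice d (some (i-1)) (some i) = String.ofList [ch] :=
    sliceCharEq d i ch h1 hch
  have hd0 : PySem.Str.slice d none (some 1) = String.ofList [c0] := by
    rw [ofListSliceTake d 1 (by omega), ← hLdef, hLc]
    rfl
  have hIc : (PySem.Str.slice d (some (i-1)) (some i) ≠ "0") ↔ (x.getLast? ≠ some '0') := by
    rw [hcs, hxl, ne_eq, ofList_eq_zero_iff]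
    simp
  have hI0 : (PySem.Str.slice d none (some 1) ≠ "0") ↔ (x.head? ≠ some '0') := by
    rw [hd0, hxh, ne_eq, ofList_eq_zero_iff]
    simp
  have hI1 : (PySem.Str.slice d none (some 1) ≠ "0" ∨ i = 1) ↔ (x.head? ≠ some '0' ∨ x.length = 1) := by
    apply or_congr hI0
    rw [hxlen]
    omega
  rw [ofListSliceTake d i (by omega), ← hLdef, ← hxdef]
  rw [parts_split x hxne]
  rw [if_congr hIc (if_congr hI0 rfl rfl) rfl, if_congr hI1 rfl rfl]

theorem rights_eq (d : String) (i : Int) (h1 : 1 ≤ i) (h2 : i < PySem.Str.len d) :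
    (if (decide (0 < PySem.Str.len d ∧ PySem.Str.slice d (some (-1)) none ≠ "0")) = true then
       (if PySem.Str.slice d (some i) (some (i+1)) ≠ "0" then
          pvRallSuffix (PySem.Str.slice d (some i) none).toList
        else (pvRallSuffix (PySem.Str.slice d (some i) none).toList).take 1) else [])
    ++ (if PySem.Str.slice d (some i) (some (i+1)) ≠ "0" ∨ i = PySem.Str.len d - 1 then
          [PySem.Str.slice d (some i) none] else [])
    = pvPartsB (PySem.Str.slice d (some i) none) := by
  have hlen : PySem.Str.len d = (d.toList.length : Int) := PySem.Str.len_eq d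
  set L := d.toList with hLdef
  set y := L.drop i.toNat with hydef
  have hylen : y.length = L.length - i.toNat := by
    rw [hydef, List.length_drop]
  have hyne : y ≠ [] := by
    intro hnil
    have := congrArg List.length hnil
    rw [hylen] at this
    simp at this
    omega
  obtain ⟨ch, hch⟩ : ∃ ch, L[i.toNat]? = some ch :=
    ⟨_, List.getElem?_eq_getElem (by omega)⟩
  have hyh : y.head? = some ch := by
    rw [hydef, List.head?_drop, hch]
  have hyl : y.getLast? = L.getLast? := by
    rw [hydef, List.getLast?_drop, if_neg (by omega)]
  obtain ⟨g, hg⟩ : ∃ g, L.getLast? = some g := by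
    have hne : L ≠ [] := by
      intro h
      rw [h] at hlen
      simp only [List.length_nil, Nat.cast_zero] at hlen
      omega
    cases hgl : L.getLast? with
    | none => exact absurd (List.getLast?_eq_none_iff.mp hgl) hne
    | some g => exact ⟨g, rfl⟩
  have hdropLast : L.drop (L.length - 1) = [g] := by
    have hlast' : L.getLast? = L[L.length - 1]? := List.getLast?_eq_getElem?
    have hh : (L.drop (L.length - 1)).head? = some g := by
      rw [List.head?_drop, ← hlast', hg]
    have hl1 : (L.drop (L.length - 1)).length = 1 := by
      rw [List.length_drop]
      omega
    cases hdd : L.drop (L.length - 1) with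
    | nil => rw [hdd] at hl1; simp at hl1
    | cons a b =>
      rw [hdd] at hh hl1
      simp at hh hl1
      rw [hh, hl1]
  have htl : PySem.Str.slice d (some (-1)) none = String.ofList [g] := by
    apply String.toList_inj.mp
    simp only [PySem.Str.toList_slice, PySem.Chars.slice_eq_listSlice,
      PySem.List.slice_from_neg_one]
    rw [← hLdef, hdropLast]
    simp
  have htOk : ((decide (0 < PySem.Str.len d ∧ PySem.Str.slice d (some (-1)) none ≠ "0")) = true)
      ↔ (y.getLast? ≠ some '0') := by
    rw [decide_eq_true_iff, htl, hyl, hg, ne_eq, ne_eq, ofList_eq_zero_iff]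
    constructor
    · rintro ⟨-, hgne⟩
      simp [List.cons.injEq] at hgne ⊢
      exact hgne
    · intro hgne
      refine ⟨by omega, ?_⟩
      simp at hgne ⊢
      exact hgne
  have hdi : PySem.Str.slice d (some i) (some (i+1)) = String.ofList [ch] := by
    have := sliceCharEq d (i+1) ch (by omega) (by rw [show (i+1).toNat - 1 = i.toNat by omega]; exact hch)
    rw [show i + 1 - 1 = i by omega] at this
    exact this
  have hIdi : (PySem.Str.slice d (some i) (some (i+1)) ≠ "0") ↔ (y.head? ≠ some '0') := by
    rw [hdi, hyh, ne_eq, ofList_eq_zero_iff]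
    simp
  have hIlen : (PySem.Str.slice d (some i) (some (i+1)) ≠ "0" ∨ i = PySem.Str.len d - 1)
      ↔ (y.head? ≠ some '0' ∨ y.length = 1) := by
    apply or_congr hIdi
    rw [hylen]
    omega
  have hri : pvRallSuffix (PySem.Str.slice d (some i) none).toList = pvDotAll y := by
    rw [sliceDrop d i (by omega), ← hLdef, ← hydef, rall_eq_dotAll]
  rw [hri, ofListSliceDrop d i (by omega), ← hLdef, ← hydef]
  rw [parts_split y hyne]
  rw [if_congr htOk (if_congr hIdi rfl rfl) rfl, if_congr hIlen rfl rfl]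

theorem step_eq (d : String) (i : Int) (h1 : 1 ≤ i) (h2 : i < PySem.Str.len d)
    (res : List String) :
    pvStepB d (pvDotAll (d.toList.take (i - 1).toNat), res) i =
      (pvDotAll (d.toList.take i.toNat), res ++ pvCross d i) := by
  have hlen : PySem.Str.len d = (d.toList.length : Int) := PySem.Str.len_eq d
  unfold pvStepB
  dsimp only
  have hdl : (if 1 < i then
      (pvDotAll (d.toList.take (i-1).toNat)).map (fun x => x ++ PySem.Str.slice d (some (i-1)) (some i)) ++
        [PySem.Str.slice d none (some (i-1)) ++ "." ++ PySem.Str.slice d (some (i-1)) (some i)]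
    else pvDotAll (d.toList.take (i-1).toNat)) = pvDotAll (d.toList.take i.toNat) := by
    by_cases hgt : 1 < i
    · rw [if_pos hgt]
      obtain ⟨ch, hch⟩ : ∃ ch, d.toList[i.toNat - 1]? = some ch :=
        ⟨_, List.getElem?_eq_getElem (by omega)⟩
      have htake : d.toList.take i.toNat = d.toList.take (i-1).toNat ++ [ch] := by
        rw [show i.toNat = (i-1).toNat + 1 by omega, List.take_add_one,
            show (i-1).toNat = i.toNat - 1 by omega, hch]
        rfl
      rw [htake, dotAll_snoc _ ch (by
            have hlen2 : (d.toList.take (i-1).toNat).length = (i-1).toNat := by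
              rw [List.length_take]
              omega
            intro hnil
            rw [hnil] at hlen2
            simp at hlen2
            omega)]
      rw [sliceCharEq d i ch h1 hch, ofListSliceTake d (i-1) (by omega)]
    · rw [if_neg hgt]
      rw [pvDotAll_short _ (by rw [List.length_take]; omega),
          pvDotAll_short _ (by rw [List.length_take]; omega)]
  rw [hdl]
  refine Prod.ext rfl ?_
  dsimp only
  simp only [PySem.List.foldl_append_singleton_eq_map, PySem.List.foldl_append_eq_flatMap]
  rw [lefts_eq d i h1 h2, rights_eq d i h1 h2]
  rfl

theorem loopB (d : String) (k : Nat) : ∀ (a : Int), 1 ≤ a → (PySem.Str.len d - a).toNat ≤ k →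
    ∀ res : List String,
    ((PySem.List.pyRange a (PySem.Str.len d)).foldl (pvStepB d)
        (pvDotAll (d.toList.take (a - 1).toNat), res)).2
      = res ++ (PySem.List.pyRange a (PySem.Str.len d)).flatMap (pvCross d) := by
  induction k with
  | zero =>
    intro a ha hk res
    rw [PySem.List.pyRange_one_eq_nil (by omega)]
    simp
  | succ k ih =>
    intro a ha hk res
    by_cases hab : PySem.Str.len d ≤ a
    · rw [PySem.List.pyRange_one_eq_nil (by omega)]
      simp
    · rw [PySem.List.pyRange_one_cons (by omega)]
      rw [List.foldl_cons, step_eq d a ha (by omega)]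
      rw [show d.toList.take a.toNat = d.toList.take ((a+1)-1).toNat by norm_num]
      rw [ih (a+1) (by omega) (by omega) (res ++ pvCross d a)]
      rw [List.flatMap_cons, List.append_assoc]

theorem B_eq_mid (s : String) : ambiguousCoordinates_alt s = pvMid s := by
  rw [alt_eq_foldl]
  unfold pvMid
  dsimp only
  set d := PySem.Str.slice s (some 1) (some (-1)) with hd
  rw [show (([], []) : List String × List String)
        = (pvDotAll (d.toList.take ((1:Int) - 1).toNat), ([] : List String)) from rfl]
  rw [loopB d (PySem.Str.len d - 1).toNat 1 (by omega) (by omega) []]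
  simp

theorem ambiguousCoordinates_eq (s : String) : ambiguousCoordinates s = ambiguousCoordinates_alt s := by
  rw [A_eq_mid, B_eq_mid]

-- ===== VERDICT (by name: the statement is the Claim_ definition above) =====
theorem ambiguousCoordinates_spec : Claim_equal_ambiguousCoordinates := by
  intro s _
  exact ambiguousCoordinates_eq s
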